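-- pv_equiv track=rewrite | github.com/Xucranger/PLofLBFL | TraditionalFLForBugT&Condefects/SBFL/SBFL.py | SUnion
-- ===== SOURCE A (Python) =====
-- def SUnion(lineNum, cov, res):
--     temp = {}
--     for i in range(1, lineNum + 1):
--         temp[i] = 0
--     caseNum = len(res)
--     for caseIndex in range(caseNum):
--         if res[caseIndex] == False:
--             for i in cov[caseIndex]:
--                 if i in temp.keys():
--                     temp[i] = 1
--     return temp
-- ===== SOURCE B (Python) =====
-- def SUnion(lineNum, cov, res):
--     # Loop inversion: for each line, test it against every failing case directly,
--     # instead of marking a pre-zeroed table case by case.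
--     return {i: int(any(res[k] == False and i in cov[k] for k in range(len(res))))
--             for i in range(1, lineNum + 1)}
-- ===== Notes on version B (the rewrite author's own statement) =====
-- stated objective: alternative
-- what changed: B inverts the loop nesting: instead of pre-filling a zero dict and marking lines case by case, it builds the result in one comprehension over the lines, computing each value as any(failing case covers this line); there is no mutable table at all, and the traversal order (lines outer, cases inner) is the opposite of A's.
import Mathlib
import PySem

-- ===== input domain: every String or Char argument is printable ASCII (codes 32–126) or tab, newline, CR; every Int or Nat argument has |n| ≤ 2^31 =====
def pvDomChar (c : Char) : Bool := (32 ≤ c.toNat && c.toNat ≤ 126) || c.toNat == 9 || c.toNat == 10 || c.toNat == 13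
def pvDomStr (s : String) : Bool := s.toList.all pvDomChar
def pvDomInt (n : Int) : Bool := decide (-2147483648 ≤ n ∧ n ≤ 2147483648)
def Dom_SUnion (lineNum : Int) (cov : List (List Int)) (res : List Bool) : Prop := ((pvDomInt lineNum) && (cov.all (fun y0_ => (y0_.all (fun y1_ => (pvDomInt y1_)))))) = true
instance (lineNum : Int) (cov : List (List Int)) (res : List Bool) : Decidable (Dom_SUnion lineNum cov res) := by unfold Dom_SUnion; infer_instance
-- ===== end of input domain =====

-- B inverts the loop nesting: one pass over the lines, each value computed directly as
-- "does any failing case cover this line" — no mutable table (alternative decomposition; same result).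

-- ===== PORT A =====
def SUnion (lineNum : Int) (cov : List (List Int)) (res : List Bool) : List (Int × Int) :=
  let temp : PySem.Dict Int Int :=
    (PySem.List.pyRange 1 (lineNum + 1) 1).foldl (fun d i => d.insert i 0) PySem.Dict.empty
  let caseNum : Int := PySem.List.len res
  let temp :=
    (PySem.List.pyRange 0 caseNum 1).foldl (fun d caseIndex =>
      if PySem.List.pyGetD res caseIndex true = false then
        (PySem.List.pyGetD cov caseIndex []).foldl
          (fun d i => if d.contains i then d.insert i 1 else d) d
      else d) temp
  temp.items

-- ===== PORT B =====
def SUnion_alt (lineNum : Int) (cov : List (List Int)) (res : List Bool) : List (Int × Int) :=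
  (PySem.List.pyRange 1 (lineNum + 1) 1).map (fun i =>
    (i, if (List.range res.length).any
            (fun k => PySem.List.pyGetD res k true = false ∧ i ∈ PySem.List.pyGetD cov k [])
        then 1 else 0))

-- ===== PRECONDITION & SPEC =====
-- Pre_ excludes exactly the inputs on which A raises IndexError: a failing case index with no coverage list.
def Pre_SUnion (lineNum : Int) (cov : List (List Int)) (res : List Bool) : Prop :=
  (res.drop cov.length).all (fun b => b) = true
instance (lineNum : Int) (cov : List (List Int)) (res : List Bool) : Decidable (Pre_SUnion lineNum cov res) := by unfold Pre_SUnion; infer_instance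
def pvWitness_SUnion : Int × List (List Int) × List Bool := (3, [[1, 2], [3]], [false, true])

def Spec_SUnion (lineNum : Int) (cov : List (List Int)) (res : List Bool) (out : List (Int × Int)) : Prop := out = SUnion_alt lineNum cov res
instance (lineNum : Int) (cov : List (List Int)) (res : List Bool) (out : List (Int × Int)) : Decidable (Spec_SUnion lineNum cov res out) := by unfold Spec_SUnion; infer_instance

-- ===== CLAIM (what is proved, stated in full; the proofs are below) =====
def Claim_equal_SUnion : Prop := ∀ (lineNum : Int) (cov : List (List Int)) (res : List Bool), Dom_SUnion lineNum cov res → Pre_SUnion lineNum cov res → Spec_SUnion lineNum cov res (SUnion lineNum cov res)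

-- ===== LEMMAS AND PROOFS =====

-- A's inner marking loop on a dict whose items are R.map (j, g j).
theorem markFold_items (R : List Int) (L : List Int) (d : PySem.Dict Int Int) (g : Int → Int)
    (hd : d.items = R.map fun j => (j, g j)) :
    (L.foldl (fun d i => if d.contains i then d.insert i 1 else d) d).items =
      R.map fun j => (j, if j ∈ L then 1 else g j) := by
  induction L generalizing d g with
  | nil => simpa using hd
  | cons i L ih =>
    have hkeys : d.keys = R := by
      show d.items.map Prod.fst = R
      rw [hd, List.map_map]; simp [Function.comp_def]
    have hcont : d.contains i = decide (i ∈ R) := by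
      rw [PySem.Dict.contains_eq_decide_mem_keys, hkeys]
    simp only [List.foldl_cons]
    by_cases hiR : i ∈ R
    · rw [if_pos (by simp [hcont, hiR])]
      have hins : (d.insert i 1).items = R.map fun j => (j, if j = i then 1 else g j) := by
        rw [PySem.Dict.items_insert_of_contains _ _ (by simp [hcont, hiR]), hd, List.map_map]
        apply List.map_congr_left
        intro j _
        by_cases hji : j = i
        · subst hji; simp
        · simp [hji]
      rw [ih _ _ hins]
      apply List.map_congr_left
      intro j _
      by_cases h1 : j ∈ L <;> by_cases h2 : j = i <;> simp [h1, h2]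
    · rw [if_neg (by simp [hcont, hiR])]
      rw [ih _ _ hd]
      apply List.map_congr_left
      intro j hjR
      have hji : ¬ j = i := fun h => hiR (h ▸ hjR)
      by_cases h1 : j ∈ L <;> simp [h1, hji]

theorem getD_tail_succ {α : Type} (xs : List α) (k : Nat) (d : α) :
    xs.getD (k + 1) d = xs.tail.getD k d := by
  cases xs <;> simp

theorem ite_nest_or {p q : Prop} [Decidable p] [Decidable q] [Decidable (q ∨ p)] (a b : Int) :
    (if p then a else if q then a else b) = if q ∨ p then a else b := by
  by_cases hp : p
  · simp [hp]
  · by_cases hq : q <;> simp [hp, hq]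

-- A's outer loop, rephrased over List.range, produces the per-line-tested map.
theorem outerFold_items (R : List Int) (res : List Bool) (cov : List (List Int))
    (d : PySem.Dict Int Int) (g : Int → Int)
    (hd : d.items = R.map fun j => (j, g j)) :
    ((List.range res.length).foldl (fun d k =>
        if res.getD k true = false then
          (cov.getD k []).foldl (fun d i => if d.contains i then d.insert i 1 else d) d
        else d) d).items =
      R.map fun j => (j, if ∃ k < res.length, res.getD k true = false ∧ j ∈ cov.getD k []
                         then 1 else g j) := by
  induction res generalizing cov d g with
  | nil => simpa using hd
  | cons b res ih =>
    rw [List.length_cons, List.range_succ_eq_map, List.foldl_cons, List.foldl_map]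
    simp only [Nat.succ_eq_add_one, List.getD_cons_zero, getD_tail_succ, List.tail_cons]
    have hiff : ∀ j, (∃ k < res.length + 1, (b :: res).getD k true = false ∧ j ∈ cov.getD k [])
        ↔ ((b = false ∧ j ∈ cov.getD 0 []) ∨
           ∃ k < res.length, res.getD k true = false ∧ j ∈ cov.tail.getD k []) := by
      intro j
      constructor
      · rintro ⟨k, hk, h1, h2⟩
        cases k with
        | zero => exact Or.inl ⟨by simpa using h1, h2⟩
        | succ k =>
          refine Or.inr ⟨k, by omega, by simpa using h1, ?_⟩
          rwa [← getD_tail_succ]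
      · rintro (⟨h1, h2⟩ | ⟨k, hk, h1, h2⟩)
        · exact ⟨0, by omega, by simpa using h1, h2⟩
        · exact ⟨k + 1, by omega, by simpa using h1, by rwa [getD_tail_succ]⟩
    by_cases hb : b = false
    · rw [if_pos hb]
      rw [ih cov.tail _ _ (markFold_items R (cov.getD 0 []) d g hd)]
      apply List.map_congr_left
      intro j _
      subst hb
      simp only [hiff j, true_and]
      rw [ite_nest_or]
    · rw [if_neg hb]
      rw [ih cov.tail _ _ hd]
      apply List.map_congr_left
      intro j _
      have hb' : (b = false) = False := by simp [hb]
      simp only [hiff j, hb', false_and, false_or]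

-- ===== VERDICT (by name: the statement is the Claim_ definition above) =====
theorem SUnion_spec : Claim_equal_SUnion := by
  intro lineNum cov res _ _
  unfold Spec_SUnion
  simp only [SUnion, SUnion_alt]
  have hinit : ((PySem.List.pyRange 1 (lineNum + 1) 1).foldl
      (fun d i => d.insert i 0) PySem.Dict.empty).items =
      (PySem.List.pyRange 1 (lineNum + 1) 1).map (fun j => (j, (0 : Int))) := by
    have h := PySem.Dict.items_foldl_insert_fresh (PySem.List.pyRange 1 (lineNum + 1) 1)
      (fun a => a) (fun _ => (0 : Int)) PySem.Dict.empty
      (fun a _ => by simp) (by simpa using PySem.List.nodup_pyRange_one 1 (lineNum + 1))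
    simpa using h
  rw [PySem.List.len_eq, PySem.List.pyRange_one 0 (res.length : Int)]
  simp only [sub_zero, Int.toNat_natCast, List.foldl_map, zero_add,
    PySem.List.pyGetD_natCast]
  rw [outerFold_items (PySem.List.pyRange 1 (lineNum + 1) 1) res cov _ (fun _ => (0 : Int))
    hinit]
  apply List.map_congr_left
  intro j _
  have hany : ((List.range res.length).any
      (fun k => decide (res.getD k true = false ∧ j ∈ cov.getD k [])) = true) ↔
      ∃ k < res.length, res.getD k true = false ∧ j ∈ cov.getD k [] := by
    simp only [List.any_eq_true, List.mem_range, decide_eq_true_eq]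
  by_cases h : ∃ k < res.length, res.getD k true = false ∧ j ∈ cov.getD k []
  · rw [if_pos h, if_pos (hany.mpr h)]
  · rw [if_neg h, if_neg (fun hc => h (hany.mp hc))]
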